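-- pv_equiv track=rewrite | github.com/KaYunKIM/ssafy | kayunkim/문제풀이/Programmers/PYTHON/카카오/비밀지도.py | solution
-- ===== SOURCE A (Python) =====
-- def solution(n, arr1, arr2):
--     answer = []
--     for i in range(n):
--         x= '{0:b}'.format(arr1[i])
--         y= '{0:b}'.format(arr2[i])
--         ans = ''
--         while len(x)!=n or len(y)!=n:
--             if len(x) != n:
--                 x= '0'+x
--             if len(y) !=n:
--                 y = '0'+y
--         for j in range(n):
--             if x[j] =='1' or y[j]=='1':
--                 ans+='#'
--             else:
--                 ans+=' '
--         answer.append(ans)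
--     return answer
-- ===== SOURCE B (Python) =====
-- def solution(n, arr1, arr2):
--     return [
--         ''.join('#' if (arr1[i] | arr2[i]) >> (n - 1 - j) & 1 else ' ' for j in range(n))
--         for i in range(n)
--     ]
-- ===== Notes on version B (the rewrite author's own statement) =====
-- stated objective: simpler
-- what changed: Replaces A's binary-string formatting, '0'-prepending padding while-loop and character-wise OR of two padded strings by direct bit arithmetic: output character j of row i is computed from ((arr1[i] | arr2[i]) >> (n-1-j)) & 1, with no string formatting or padding at all.
-- outside the precondition, e.g. on solution(3, [-1, 2, 0], [0, 1, 0]): A returns ['  #', ' ##', '   '], B returns ['###', ' ##', '   ']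
import Mathlib
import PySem

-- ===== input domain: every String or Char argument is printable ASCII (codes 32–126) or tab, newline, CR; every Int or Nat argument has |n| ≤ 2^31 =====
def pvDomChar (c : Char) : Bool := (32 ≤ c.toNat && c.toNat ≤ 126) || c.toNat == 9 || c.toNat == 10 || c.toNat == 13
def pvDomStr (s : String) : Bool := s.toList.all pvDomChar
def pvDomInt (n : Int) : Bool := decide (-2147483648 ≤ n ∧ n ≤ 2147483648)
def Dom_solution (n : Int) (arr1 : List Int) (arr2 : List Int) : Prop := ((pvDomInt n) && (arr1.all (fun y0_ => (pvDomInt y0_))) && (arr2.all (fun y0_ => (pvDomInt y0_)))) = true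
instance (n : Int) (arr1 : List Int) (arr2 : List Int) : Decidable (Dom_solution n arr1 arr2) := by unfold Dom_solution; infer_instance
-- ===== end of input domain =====

-- B replaces A's binary-string formatting, '0'-prepending padding while-loop and character-wise
-- OR of two padded strings by direct bit arithmetic ((arr1[i]|arr2[i]) >> (n-1-j)) & 1 (simpler).


-- ===== PORT A =====
-- binary digits of v, most significant first ([] for v = 0); '{0:b}'.format builds on this
def pvGo (v : Nat) : List Char :=
  if v = 0 then [] else pvGo (v / 2) ++ [if v % 2 = 1 then '1' else '0']
decreasing_by exact Nat.div_lt_self (by omega) (by omega)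

-- '{0:b}'.format(v)  (exact: '-' prefix for negative v, '0' for zero)
def pvFmtBin (v : Int) : List Char :=
  if v < 0 then '-' :: pvGo (-v).toNat
  else if v = 0 then ['0'] else pvGo v.toNat

-- the while-loop "while len(x)!=n or len(y)!=n: …"; the fuel makes the possibly
-- non-terminating Python loop total (inside Pre_ the fuel is never exhausted)
def pvPadLoop (n : Nat) : Nat → List Char → List Char → List Char × List Char
  | 0, x, y => (x, y)
  | f + 1, x, y =>
    if x.length ≠ n ∨ y.length ≠ n then
      pvPadLoop n f (if x.length ≠ n then '0' :: x else x)
                    (if y.length ≠ n then '0' :: y else y)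
    else (x, y)

-- body of A's outer loop: one row of the answer
def pvRowA (n : Int) (arr1 : List Int) (arr2 : List Int) (i : Int) : String :=
  let x0 := pvFmtBin (PySem.List.pyGetD arr1 i 0)
  let y0 := pvFmtBin (PySem.List.pyGetD arr2 i 0)
  let p := pvPadLoop n.toNat (2 * n.toNat + 2) x0 y0
  let ans := (PySem.List.pyRange 0 n 1).foldl (fun ans j =>
    if PySem.List.pyGetD p.1 j ' ' = '1' ∨ PySem.List.pyGetD p.2 j ' ' = '1'
    then ans ++ ['#'] else ans ++ [' ']) ([] : List Char)
  String.ofList ans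

def solution (n : Int) (arr1 : List Int) (arr2 : List Int) : List String :=
  (PySem.List.pyRange 0 n 1).foldl (fun answer i => answer ++ [pvRowA n arr1 arr2 i]) []

-- ===== PORT B =====
-- one row: ''.join('#' if (arr1[i] | arr2[i]) >> (n - 1 - j) & 1 else ' ' for j in range(n))
def pvRowB (n : Int) (arr1 : List Int) (arr2 : List Int) (i : Int) : String :=
  let v := PySem.Int.bor (PySem.List.pyGetD arr1 i 0) (PySem.List.pyGetD arr2 i 0)
  String.ofList ((PySem.List.pyRange 0 n 1).map (fun j =>
    if PySem.Int.band (v >>> (n - 1 - j).toNat) 1 = 1 then '#' else ' '))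

def solution_alt (n : Int) (arr1 : List Int) (arr2 : List Int) : List String :=
  (PySem.List.pyRange 0 n 1).map (pvRowB n arr1 arr2)

-- ===== PRECONDITION & SPEC =====
-- Pre_ restricts to the problem's (Programmers 비밀지도) natural domain: rows of length ≥ n whose
-- first n values satisfy 0 ≤ v < 2^n.  Outside it A raises IndexError (rows shorter than n), its
-- padding while-loop never terminates (values needing more than n bits), or — on negative values
-- that happen to fit — A zero-pads a '-'-signed binary literal into accidental strings, a corner
-- no caller specifies; B reads negatives in two's complement there instead.
def Pre_solution (n : Int) (arr1 : List Int) (arr2 : List Int) : Prop :=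
  n ≤ (arr1.length : Int) ∧ n ≤ (arr2.length : Int) ∧
  (∀ a ∈ arr1.take n.toNat, 0 ≤ a ∧ a < 2 ^ n.toNat) ∧
  (∀ a ∈ arr2.take n.toNat, 0 ≤ a ∧ a < 2 ^ n.toNat)
instance (n : Int) (arr1 : List Int) (arr2 : List Int) : Decidable (Pre_solution n arr1 arr2) := by
  unfold Pre_solution; infer_instance

def pvWitness_solution : Int × List Int × List Int := (2, [1, 2], [3, 0])

def Spec_solution (n : Int) (arr1 : List Int) (arr2 : List Int) (out : List String) : Prop := out = solution_alt n arr1 arr2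
instance (n : Int) (arr1 : List Int) (arr2 : List Int) (out : List String) : Decidable (Spec_solution n arr1 arr2 out) := by unfold Spec_solution; infer_instance

-- ===== CLAIM (what is proved, stated in full; the proofs are below) =====
def Claim_equal_solution : Prop := ∀ (n : Int) (arr1 : List Int) (arr2 : List Int), Dom_solution n arr1 arr2 → Pre_solution n arr1 arr2 → Spec_solution n arr1 arr2 (solution n arr1 arr2)

-- ===== LEMMAS AND PROOFS =====
-- the n-bit window of v, most significant first: what both rows boil down to
def pvBits (nn : Nat) (v : Nat) : List Char :=
  (List.range nn).map (fun j => if Nat.testBit v (nn - 1 - j) then '1' else '0')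

-- '{0:b}'.format for a nonnegative value, as a list of chars
def pvBinStr (v : Nat) : List Char := if v = 0 then ['0'] else pvGo v

theorem pvFmtBin_nonneg (v : Int) (h : 0 ≤ v) : pvFmtBin v = pvBinStr v.toNat := by
  unfold pvFmtBin pvBinStr
  rcases lt_or_eq_of_le h with h' | h'
  · rw [if_neg (by omega), if_neg (by omega), if_neg (by omega)]
  · simp [← h']

theorem pvGo_length (k : Nat) : ∀ v : Nat, v < 2 ^ k → (pvGo v).length ≤ k := by
  induction k with
  | zero => intro v hv; interval_cases v; simp [pvGo]
  | succ k ih =>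
    intro v hv
    rw [pvGo]
    split
    · simp
    · have := ih (v / 2) (by omega)
      simp only [List.length_append, List.length_cons, List.length_nil]
      omega

theorem pvBinStr_length (k v : Nat) (h1 : 1 ≤ k) (hv : v < 2 ^ k) : (pvBinStr v).length ≤ k := by
  unfold pvBinStr
  split
  · simpa
  · exact pvGo_length k v hv

theorem pvBits_succ (nn v : Nat) :
    pvBits (nn + 1) v = pvBits nn (v / 2) ++ [if v % 2 = 1 then '1' else '0'] := by
  unfold pvBits
  rw [List.range_succ, List.map_append]
  congr 1
  · apply List.map_congr_left
    intro j hj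
    rw [List.mem_range] at hj
    have h : nn + 1 - 1 - j = (nn - 1 - j) + 1 := by omega
    rw [h, Nat.testBit_add_one]
  · simp [Nat.testBit_zero]

theorem pvBits_zero (nn : Nat) : pvBits nn 0 = List.replicate nn '0' := by
  unfold pvBits
  rw [List.eq_replicate_iff]
  refine ⟨by simp, ?_⟩
  intro c hc
  rw [List.mem_map] at hc
  obtain ⟨j, _, hj⟩ := hc
  simpa [Nat.zero_testBit] using hj.symm

theorem pvPad_eq_bits (nn : Nat) (h1 : 1 ≤ nn) : ∀ v : Nat, v < 2 ^ nn →
    List.replicate (nn - (pvBinStr v).length) '0' ++ pvBinStr v = pvBits nn v := by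
  induction nn with
  | zero => omega
  | succ nn ih =>
    intro v hv
    rcases Nat.eq_zero_or_pos v with hv0 | hvpos
    · subst hv0
      rw [show pvBinStr 0 = ['0'] by simp [pvBinStr], pvBits_zero]
      simp only [List.length_cons, List.length_nil, Nat.add_sub_cancel]
      rw [← List.replicate_succ']
    · -- v > 0 : pvBinStr v = pvGo v = pvGo (v/2) ++ [bit]
      have hbs : pvBinStr v = pvGo (v / 2) ++ [if v % 2 = 1 then '1' else '0'] := by
        unfold pvBinStr
        rw [if_neg (by omega)]
        rw [pvGo]; rw [if_neg (by omega)]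
      rcases Nat.eq_zero_or_pos nn with hz | hpos
      · -- nn = 0 : v < 2, so v = 1
        subst hz
        have hv1 : v = 1 := by omega
        subst hv1
        rw [hbs]
        have hg0 : pvGo (1 / 2) = [] := by rw [pvGo]; simp
        rw [hg0]
        simp [pvBits]
      · rw [pvBits_succ]
        rcases Nat.eq_zero_or_pos (v / 2) with hq0 | hqpos
        · -- v = 1 : pvGo (v/2) = []
          have hv1 : v = 1 := by omega
          subst hv1
          have hg0 : pvGo (1 / 2) = [] := by rw [pvGo]; simp
          rw [hbs, hg0, List.nil_append]
          have hIH := ih hpos 0 (by positivity)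
          rw [show pvBinStr 0 = ['0'] by simp [pvBinStr]] at hIH
          rw [show (1 : Nat) / 2 = 0 from by omega, ← hIH]
          simp only [List.length_cons, List.length_nil, Nat.add_sub_cancel]
          rw [show nn = (nn - 1) + 1 by omega, List.replicate_succ']
          simp
        · have hvq : v / 2 < 2 ^ nn := by
            have : 2 ^ (nn + 1) = 2 ^ nn * 2 := by ring
            omega
          have hIH := ih hpos (v / 2) hvq
          have hbq : pvBinStr (v / 2) = pvGo (v / 2) := by
            unfold pvBinStr; rw [if_neg (by omega)]
          rw [hbq] at hIH
          have hlen : (pvGo (v / 2)).length ≤ nn := pvGo_length nn (v / 2) hvq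
          rw [hbs, ← hIH]
          simp only [List.length_append, List.length_cons, List.length_nil]
          rw [show nn + 1 - ((pvGo (v / 2)).length + 1) = nn - (pvGo (v / 2)).length by omega]
          simp [List.append_assoc]

theorem pvPadStep (nn : Nat) (z : List Char) (hz : z.length < nn) :
    List.replicate (nn - ('0' :: z).length) '0' ++ ('0' :: z) =
      List.replicate (nn - z.length) '0' ++ z := by
  simp only [List.length_cons]
  rw [show nn - z.length = (nn - (z.length + 1)) + 1 by omega, List.replicate_succ']
  simp [List.append_assoc]

theorem pvPadLoop_eq (nn : Nat) : ∀ (f : Nat) (x y : List Char), x.length ≤ nn → y.length ≤ nn →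
    nn - x.length < f → nn - y.length < f →
    pvPadLoop nn f x y =
      (List.replicate (nn - x.length) '0' ++ x, List.replicate (nn - y.length) '0' ++ y) := by
  intro f
  induction f with
  | zero => omega
  | succ f ih =>
    intro x y hx hy hfx hfy
    rw [pvPadLoop]
    by_cases hc : x.length ≠ nn ∨ y.length ≠ nn
    · rw [if_pos hc]
      have hone : 1 ≤ nn - x.length ∨ 1 ≤ nn - y.length := by
        rcases hc with h | h <;> omega
      have hx1 : (if x.length ≠ nn then '0' :: x else x).length ≤ nn := by
        split
        · next h => simp only [List.length_cons]; omega
        · omega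
      have hy1 : (if y.length ≠ nn then '0' :: y else y).length ≤ nn := by
        split
        · next h => simp only [List.length_cons]; omega
        · omega
      have hx2 : nn - (if x.length ≠ nn then '0' :: x else x).length < f := by
        split
        · next h => simp only [List.length_cons]; omega
        · next h => simp only [ne_eq, not_not] at h; omega
      have hy2 : nn - (if y.length ≠ nn then '0' :: y else y).length < f := by
        split
        · next h => simp only [List.length_cons]; omega
        · next h => simp only [ne_eq, not_not] at h; omega
      rw [ih _ _ hx1 hy1 hx2 hy2]
      congr 1
      · split
        · next h => exact pvPadStep nn x (by omega)
        · rfl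
      · split
        · next h => exact pvPadStep nn y (by omega)
        · rfl
    · rw [if_neg hc]
      simp only [ne_eq, not_or, not_not] at hc
      rw [hc.1, hc.2]
      simp

theorem pvBits_get (nn v : Nat) (j : Int) (h0 : 0 ≤ j) (h1 : j < (nn : Int)) :
    PySem.List.pyGetD (pvBits nn v) j ' ' =
      if Nat.testBit v (nn - 1 - j.toNat) then '1' else '0' := by
  have hlt : j.toNat < nn := by omega
  rw [PySem.List.pyGetD_eq_getElem _ _ h0 (by simp [pvBits]; omega)]
  unfold pvBits
  rw [List.getElem_map, List.getElem_range]

-- condition of B's inner comprehension, reduced to a test bit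
theorem pvCondB (m1 m2 : Nat) (k : Nat) :
    (PySem.Int.band ((PySem.Int.bor (m1 : Int) (m2 : Int)) >>> k) 1 = 1) ↔
      Nat.testBit (m1 ||| m2) k := by
  rw [PySem.Int.bor_natCast, ← Int.natCast_shiftRight,
    show (1 : Int) = ((1 : Nat) : Int) from rfl, PySem.Int.band_natCast, Nat.cast_inj]
  rw [Nat.and_one_is_mod, Nat.shiftRight_eq_div_pow, Nat.testBit_eq_decide_div_mod_eq]
  simp

theorem pvRow_eq (n : Int) (arr1 arr2 : List Int) (i : Int)
    (h0 : 0 ≤ i) (hi : i < n)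
    (hl1 : n ≤ (arr1.length : Int)) (hl2 : n ≤ (arr2.length : Int))
    (hb1 : ∀ a ∈ arr1.take n.toNat, 0 ≤ a ∧ a < 2 ^ n.toNat)
    (hb2 : ∀ a ∈ arr2.take n.toNat, 0 ≤ a ∧ a < 2 ^ n.toNat) :
    pvRowA n arr1 arr2 i = pvRowB n arr1 arr2 i := by
  have hn1 : (1 : Int) ≤ n := by omega
  have hi1 : i.toNat < arr1.length := by omega
  have hi2 : i.toNat < arr2.length := by omega
  have ha : PySem.List.pyGetD arr1 i 0 = arr1[i.toNat] :=
    PySem.List.pyGetD_eq_getElem _ _ h0 (by omega)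
  have hb : PySem.List.pyGetD arr2 i 0 = arr2[i.toNat] :=
    PySem.List.pyGetD_eq_getElem _ _ h0 (by omega)
  have hbnd1 := hb1 arr1[i.toNat] (by
    have h := List.getElem_take (xs := arr1) (j := n.toNat) (i := i.toNat)
      (h := by rw [List.length_take]; omega)
    rw [← h]; exact List.getElem_mem _)
  have hbnd2 := hb2 arr2[i.toNat] (by
    have h := List.getElem_take (xs := arr2) (j := n.toNat) (i := i.toNat)
      (h := by rw [List.length_take]; omega)
    rw [← h]; exact List.getElem_mem _)
  set a := arr1[i.toNat] with ha'
  set b := arr2[i.toNat] with hb'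
  have hcast : ((2 : Int) ^ n.toNat) = ((2 ^ n.toNat : Nat) : Int) := by push_cast; ring
  have hm1 : a.toNat < 2 ^ n.toNat := by
    have h2 := hbnd1.2; rw [hcast] at h2; omega
  have hm2 : b.toNat < 2 ^ n.toNat := by
    have h2 := hbnd2.2; rw [hcast] at h2; omega
  have hnn1 : 1 ≤ n.toNat := by omega
  -- the padded strings are the n-bit windows
  have hpad : pvPadLoop n.toNat (2 * n.toNat + 2) (pvFmtBin a) (pvFmtBin b) =
      (pvBits n.toNat a.toNat, pvBits n.toNat b.toNat) := by
    rw [pvFmtBin_nonneg a hbnd1.1, pvFmtBin_nonneg b hbnd2.1]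
    have la := pvBinStr_length n.toNat a.toNat hnn1 hm1
    have lb := pvBinStr_length n.toNat b.toNat hnn1 hm2
    rw [pvPadLoop_eq n.toNat (2 * n.toNat + 2) _ _ la lb (by omega) (by omega)]
    rw [pvPad_eq_bits n.toNat hnn1 a.toNat hm1, pvPad_eq_bits n.toNat hnn1 b.toNat hm2]
  simp only [pvRowA, pvRowB]
  rw [ha, hb, hpad]
  congr 1
  rw [show (fun (ans : List Char) (j : Int) =>
        if PySem.List.pyGetD (pvBits n.toNat a.toNat, pvBits n.toNat b.toNat).1 j ' ' = '1' ∨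
           PySem.List.pyGetD (pvBits n.toNat a.toNat, pvBits n.toNat b.toNat).2 j ' ' = '1'
        then ans ++ ['#'] else ans ++ [' ']) =
      (fun (ans : List Char) (j : Int) => ans ++
        [if PySem.List.pyGetD (pvBits n.toNat a.toNat) j ' ' = '1' ∨
            PySem.List.pyGetD (pvBits n.toNat b.toNat) j ' ' = '1'
         then '#' else ' ']) from by funext ans j; split <;> rfl]
  rw [PySem.List.foldl_append_singleton_eq_map]
  rw [List.nil_append]
  apply List.map_congr_left
  intro j hj
  rw [PySem.List.mem_pyRange_one] at hj
  rw [pvBits_get n.toNat a.toNat j hj.1 (by omega),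
      pvBits_get n.toNat b.toNat j hj.1 (by omega)]
  have hsh : (n - 1 - j).toNat = n.toNat - 1 - j.toNat := by omega
  have hor : PySem.Int.bor a b = ((a.toNat ||| b.toNat : Nat) : Int) := by
    rw [show a = ((a.toNat : Nat) : Int) by omega, show b = ((b.toNat : Nat) : Int) by omega]
    exact PySem.Int.bor_natCast a.toNat b.toNat
  rw [hsh, hor]
  have hc := pvCondB a.toNat b.toNat (n.toNat - 1 - j.toNat)
  rw [Nat.testBit_or, PySem.Int.bor_natCast] at hc
  have h01 : ('0' : Char) ≠ '1' := by decide
  by_cases hA : Nat.testBit a.toNat (n.toNat - 1 - j.toNat)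
  · rw [if_pos (Or.inl (by rw [if_pos hA])), if_pos (hc.mpr (by rw [hA]; simp))]
  · by_cases hB : Nat.testBit b.toNat (n.toNat - 1 - j.toNat)
    · rw [if_pos (Or.inr (by rw [if_pos hB])), if_pos (hc.mpr (by rw [hB]; simp))]
    · rw [if_neg (by rw [if_neg hA, if_neg hB]; rintro (h | h) <;> exact h01 h),
        if_neg (by rw [hc]; simp [hA, hB])]

-- ===== VERDICT (by name: the statement is the Claim_ definition above) =====
theorem solution_spec : Claim_equal_solution := by
  unfold Claim_equal_solution
  intro n arr1 arr2 _ hpre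
  obtain ⟨hl1, hl2, hb1, hb2⟩ := hpre
  unfold Spec_solution solution solution_alt
  rw [PySem.List.foldl_append_singleton_eq_map, List.nil_append]
  apply List.map_congr_left
  intro i hi
  rw [PySem.List.mem_pyRange_one] at hi
  exact pvRow_eq n arr1 arr2 i hi.1 hi.2 hl1 hl2 hb1 hb2
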